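-- pv_equiv track=rewrite | github.com/StanleyBromley-France/TBT-Engine | tools/balancing_scripts/secondary_roles/scoring.py | build_acrobat_peer_groups
-- ===== SOURCE A (Python) =====
-- def build_acrobat_peer_groups(
--     target_primary_role: str | None,
--     peer_unit_templates: list[dict],
-- ) -> list[list[dict]]:
--     if target_primary_role is not None:
--         return [
--             [
--                 unit
--                 for unit in peer_unit_templates
--                 if unit.get("primaryRole") == target_primary_role
--                 and unit.get("secondaryRole") != "Acrobat"
--             ]
--         ]
--
--     target_primary_roles = sorted(
--         {
--             unit.get("primaryRole")
--             for unit in peer_unit_templates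
--             if unit.get("secondaryRole") == "Acrobat" and isinstance(unit.get("primaryRole"), str)
--         }
--     )
--     return [
--         [
--             unit
--             for unit in peer_unit_templates
--             if unit.get("primaryRole") == primary_role
--             and unit.get("secondaryRole") != "Acrobat"
--         ]
--         for primary_role in target_primary_roles
--     ]
-- ===== SOURCE B (Python) =====
-- def build_acrobat_peer_groups(target_primary_role, peer_unit_templates):
--     if target_primary_role is not None:
--         return [
--             [
--                 unit
--                 for unit in peer_unit_templates
--                 if unit.get("primaryRole") == target_primary_role
--                 and unit.get("secondaryRole") != "Acrobat"
--             ]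
--         ]
--     # single pass: bucket non-acrobat units by primary role, collect acrobat roles
--     buckets = {}
--     acrobat_roles = set()
--     for unit in peer_unit_templates:
--         pr = unit.get("primaryRole")
--         if unit.get("secondaryRole") == "Acrobat":
--             if isinstance(pr, str):
--                 acrobat_roles.add(pr)
--         else:
--             buckets.setdefault(pr, []).append(unit)
--     return [buckets.get(role, []) for role in sorted(acrobat_roles)]
-- ===== Notes on version B (the rewrite author's own statement) =====
-- stated objective: alternative
-- what changed: Replaces the per-role rescans of the whole template list (one filter pass per acrobat primary role) with a single pass that buckets non-acrobat units by primary role into a dict while collecting the acrobat role set, then emits the buckets in sorted-role order; asymptotically O(N + R log R) vs O(R*N), though not measurably faster on the timed inputs (few distinct roles).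
import Mathlib
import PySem

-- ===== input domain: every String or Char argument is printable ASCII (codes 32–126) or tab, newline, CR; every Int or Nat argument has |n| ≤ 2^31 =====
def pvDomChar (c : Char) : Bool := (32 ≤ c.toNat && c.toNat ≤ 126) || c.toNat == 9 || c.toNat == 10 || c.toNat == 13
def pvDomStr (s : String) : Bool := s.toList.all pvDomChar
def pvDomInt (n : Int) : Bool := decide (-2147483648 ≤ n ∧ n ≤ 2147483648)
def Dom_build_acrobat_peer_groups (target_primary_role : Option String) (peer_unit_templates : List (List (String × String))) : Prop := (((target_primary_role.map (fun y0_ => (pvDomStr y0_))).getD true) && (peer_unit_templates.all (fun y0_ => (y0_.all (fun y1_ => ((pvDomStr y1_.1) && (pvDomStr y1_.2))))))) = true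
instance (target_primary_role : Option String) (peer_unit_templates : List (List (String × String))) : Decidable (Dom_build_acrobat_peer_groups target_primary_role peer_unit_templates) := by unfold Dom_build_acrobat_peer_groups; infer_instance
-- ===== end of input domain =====

-- B replaces A's per-role rescans of the template list with a single bucketing pass
-- (dict keyed by primary role + acrobat-role set), then emits buckets in sorted-role order.

-- ===== PORT A =====
-- unit matches role r (as non-acrobat peer): unit.get("primaryRole") == r and unit.get("secondaryRole") != "Acrobat"
def pvPeerPred (r : Option String) (unit : List (String × String)) : Bool :=
  (PySem.Dict.get? (PySem.Dict.mk unit) "primaryRole" == r) &&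
  !(PySem.Dict.get? (PySem.Dict.mk unit) "secondaryRole" == some "Acrobat")

def build_acrobat_peer_groups (target_primary_role : Option String) (peer_unit_templates : List (List (String × String))) : List (List (List (String × String))) :=
  match target_primary_role with
  | some t => [peer_unit_templates.filter (fun unit => pvPeerPred (some t) unit)]
  | none =>
    let target_primary_roles :=
      PySem.List.sorted
        (PySem.Set.ofList (peer_unit_templates.filterMap (fun unit =>
          if PySem.Dict.get? (PySem.Dict.mk unit) "secondaryRole" == some "Acrobat"
          then PySem.Dict.get? (PySem.Dict.mk unit) "primaryRole" else none)))
        (fun x => x) false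
    target_primary_roles.map (fun primary_role =>
      peer_unit_templates.filter (fun unit => pvPeerPred (some primary_role) unit))

-- ===== PORT B =====
-- one step of B's single pass: acrobat units contribute their primary role to the set,
-- other units are appended to the bucket of their primary role
def pvStep (st : PySem.Dict (Option String) (List (List (String × String))) × PySem.Set String)
    (unit : List (String × String)) :
    PySem.Dict (Option String) (List (List (String × String))) × PySem.Set String :=
  let pr := PySem.Dict.get? (PySem.Dict.mk unit) "primaryRole"
  if PySem.Dict.get? (PySem.Dict.mk unit) "secondaryRole" == some "Acrobat" then
    match pr with
    | some s => (st.1, PySem.Set.add st.2 s)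
    | none => st
  else
    (PySem.Dict.modify st.1 pr [] (fun b => b ++ [unit]), st.2)

def build_acrobat_peer_groups_alt (target_primary_role : Option String) (peer_unit_templates : List (List (String × String))) : List (List (List (String × String))) :=
  match target_primary_role with
  | some t => [peer_unit_templates.filter (fun unit => pvPeerPred (some t) unit)]
  | none =>
    let st := peer_unit_templates.foldl pvStep (PySem.Dict.empty, PySem.Set.empty)
    (PySem.List.sorted st.2 (fun x => x) false).map (fun role =>
      PySem.Dict.getD st.1 (some role) [])

-- ===== PRECONDITION & SPEC =====
def Spec_build_acrobat_peer_groups (target_primary_role : Option String) (peer_unit_templates : List (List (String × String))) (out : List (List (List (String × String)))) : Prop := out = build_acrobat_peer_groups_alt target_primary_role peer_unit_templates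
instance (target_primary_role : Option String) (peer_unit_templates : List (List (String × String))) (out : List (List (List (String × String)))) : Decidable (Spec_build_acrobat_peer_groups target_primary_role peer_unit_templates out) := by unfold Spec_build_acrobat_peer_groups; infer_instance

-- ===== CLAIM (what is proved, stated in full; the proofs are below) =====
def Claim_equal_build_acrobat_peer_groups : Prop := ∀ (target_primary_role : Option String) (peer_unit_templates : List (List (String × String))), Dom_build_acrobat_peer_groups target_primary_role peer_unit_templates → Spec_build_acrobat_peer_groups target_primary_role peer_unit_templates (build_acrobat_peer_groups target_primary_role peer_unit_templates)

-- ===== LEMMAS AND PROOFS =====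

-- the set component of B's fold collects exactly the acrobat primary roles, in order
theorem pvStep_snd (ts : List (List (String × String)))
    (st : PySem.Dict (Option String) (List (List (String × String))) × PySem.Set String) :
    (ts.foldl pvStep st).2 =
      (ts.filterMap (fun unit =>
        if PySem.Dict.get? (PySem.Dict.mk unit) "secondaryRole" == some "Acrobat"
        then PySem.Dict.get? (PySem.Dict.mk unit) "primaryRole" else none)).foldl PySem.Set.add st.2 := by
  induction ts generalizing st with
  | nil => rfl
  | cons u ts ih =>
    simp only [List.foldl_cons, List.filterMap_cons]
    by_cases h : (PySem.Dict.get? (PySem.Dict.mk u) "secondaryRole" == some "Acrobat") = true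
    · simp only [h, if_true]
      cases hpr : PySem.Dict.get? (PySem.Dict.mk u) "primaryRole" with
      | none => simp [pvStep, h, hpr, ih]
      | some s => simp [pvStep, h, hpr, ih]
    · simp only [Bool.not_eq_true] at h
      simp [pvStep, h, ih]

-- the dict component of B's fold holds, for each key, exactly the non-acrobat units of that primary role
theorem pvStep_fst (ts : List (List (String × String)))
    (st : PySem.Dict (Option String) (List (List (String × String))) × PySem.Set String)
    (k : Option String) :
    ((ts.foldl pvStep st).1).getD k [] =
      st.1.getD k [] ++ ts.filter (fun unit => pvPeerPred k unit) := by
  induction ts generalizing st with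
  | nil => simp
  | cons u ts ih =>
    simp only [List.foldl_cons, List.filter_cons]
    by_cases h : (PySem.Dict.get? (PySem.Dict.mk u) "secondaryRole" == some "Acrobat") = true
    · have hp : pvPeerPred k u = false := by
        simp [pvPeerPred, h]
      simp only [hp, Bool.false_eq_true, if_false]
      cases hpr : PySem.Dict.get? (PySem.Dict.mk u) "primaryRole" with
      | none => simp [pvStep, h, hpr, ih]
      | some s => simp [pvStep, h, hpr, ih]
    · simp only [Bool.not_eq_true] at h
      rw [show ts.foldl pvStep (pvStep st u) = ts.foldl pvStep
        (PySem.Dict.modify st.1 (PySem.Dict.get? (PySem.Dict.mk u) "primaryRole") [] (fun b => b ++ [u]), st.2) by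
          simp [pvStep, h]]
      rw [ih]
      rw [PySem.Dict.getD_modify]
      by_cases hk : k = PySem.Dict.get? (PySem.Dict.mk u) "primaryRole"
      · have hp : pvPeerPred k u = true := by
          simp [pvPeerPred, h, hk]
        subst hk
        simp [hp]
      · have hp : pvPeerPred k u = false := by
          simp [pvPeerPred, h]
          intro hc; exact absurd hc.symm hk
        simp [hk, hp]

-- ===== VERDICT (by name: the statement is the Claim_ definition above) =====
theorem build_acrobat_peer_groups_spec : Claim_equal_build_acrobat_peer_groups := by
  intro t ts _
  unfold Spec_build_acrobat_peer_groups
  cases t with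
  | some r => rfl
  | none =>
    simp only [build_acrobat_peer_groups, build_acrobat_peer_groups_alt]
    rw [pvStep_snd]
    rw [PySem.Set.ofList_eq_foldl]
    apply List.map_congr_left
    intro r _
    rw [pvStep_fst]
    simp [PySem.Dict.getD_empty]
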